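-- pv_equiv track=rewrite | github.com/devedale/apofasi | log_analyzer/services/llm_finetuning_service.py | _validate_text_dataset
-- ===== SOURCE A (Python) =====
-- from typing import List, Dict, Any, Optional, Union, Tuple
--
-- def _validate_text_dataset(dataset: List[Dict]) -> Dict[str, Any]:
--     """Valida un dataset di testo semplice."""
--     errors = []
--     warnings = []
--
--     if not dataset:
--         errors.append("Dataset vuoto")
--         return {"errors": errors, "warnings": warnings}
--
--     # Controlla lunghezza delle righe
--     short_lines = sum(1 for entry in dataset if len(entry.get("text", "")) < 10)
--     long_lines = sum(1 for entry in dataset if len(entry.get("text", "")) > 1000)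
--
--     if short_lines > len(dataset) * 0.3:
--         warnings.append(f"Molte righe troppo corte: {short_lines}/{len(dataset)}")
--
--     if long_lines > len(dataset) * 0.1:
--         warnings.append(f"Alcune righe molto lunghe: {long_lines}/{len(dataset)}")
--
--     return {"errors": errors, "warnings": warnings}
-- ===== SOURCE B (Python) =====
-- from typing import List, Dict, Any
--
--
-- def _bisect_left(a, x):
--     lo, hi = 0, len(a)
--     while lo < hi:
--         mid = (lo + hi) // 2
--         if a[mid] < x:
--             lo = mid + 1
--         else:
--             hi = mid
--     return lo
--
--
-- def _bisect_right(a, x):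
--     lo, hi = 0, len(a)
--     while lo < hi:
--         mid = (lo + hi) // 2
--         if x < a[mid]:
--             hi = mid
--         else:
--             lo = mid + 1
--     return lo
--
--
-- def _validate_text_dataset(dataset: List[Dict]) -> Dict[str, Any]:
--     """Sort the text lengths once; both counts fall out of two binary searches."""
--     errors = []
--     warnings = []
--
--     if not dataset:
--         errors.append("Dataset vuoto")
--         return {"errors": errors, "warnings": warnings}
--
--     lengths = sorted(len(entry.get("text", "")) for entry in dataset)
--     n = len(dataset)
--     # number of lengths < 10 = insertion point of 10 in the sorted list
--     short_lines = _bisect_left(lengths, 10)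
--     # number of lengths > 1000 = those past the insertion point after 1000
--     long_lines = n - _bisect_right(lengths, 1000)
--
--     if short_lines > n * 0.3:
--         warnings.append(f"Molte righe troppo corte: {short_lines}/{n}")
--
--     if long_lines > n * 0.1:
--         warnings.append(f"Alcune righe molto lunghe: {long_lines}/{n}")
--
--     return {"errors": errors, "warnings": warnings}
-- ===== Notes on version B (the rewrite author's own statement) =====
-- stated objective: alternative
-- what changed: B sorts the list of text lengths once and obtains both counters by hand-written binary searches (short = bisect_left(sorted_lengths, 10), long = n - bisect_right(sorted_lengths, 1000)) instead of A's two counting scans over the dataset.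
import Mathlib
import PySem

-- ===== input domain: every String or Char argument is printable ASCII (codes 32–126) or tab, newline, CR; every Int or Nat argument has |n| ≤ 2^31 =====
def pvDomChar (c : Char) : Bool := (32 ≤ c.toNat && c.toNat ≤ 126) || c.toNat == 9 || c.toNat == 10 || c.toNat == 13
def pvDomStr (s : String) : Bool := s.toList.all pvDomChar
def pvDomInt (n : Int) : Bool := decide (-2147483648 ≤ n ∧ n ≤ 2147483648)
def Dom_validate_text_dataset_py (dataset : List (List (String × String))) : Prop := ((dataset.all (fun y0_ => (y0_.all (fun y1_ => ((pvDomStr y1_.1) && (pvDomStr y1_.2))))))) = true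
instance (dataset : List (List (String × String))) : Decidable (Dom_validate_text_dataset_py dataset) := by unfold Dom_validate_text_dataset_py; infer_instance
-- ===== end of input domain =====

-- B derives both counters from one sorted list of text lengths via hand-written binary searches; return value only, no speed claim.


-- ===== PORT A =====
-- Note: Python compares the int counters against the floats len(dataset)*0.3 and len(dataset)*0.1;
-- this is ported exactly as the rational comparisons 10*s > 3*n and 10*l > 1*n, which agree with
-- CPython's float comparison for every dataset length in the 32-bit domain.
def validate_text_dataset_py (dataset : List (List (String × String))) : List (String × List String) :=
  let errors : List String := []
  let warnings : List String := []
  if dataset = [] then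
    [("errors", errors ++ ["Dataset vuoto"]), ("warnings", warnings)]
  else
    let n : Int := dataset.length
    let short_lines : Int :=
      dataset.foldl (fun acc entry =>
        if PySem.Str.len (PySem.Dict.getD (PySem.Dict.mk entry) "text" "") < 10 then acc + 1 else acc) 0
    let long_lines : Int :=
      dataset.foldl (fun acc entry =>
        if PySem.Str.len (PySem.Dict.getD (PySem.Dict.mk entry) "text" "") > 1000 then acc + 1 else acc) 0
    let warnings :=
      if 10 * short_lines > 3 * n then
        warnings ++ ["Molte righe troppo corte: " ++ PySem.Int.toStr short_lines ++ "/" ++ PySem.Int.toStr n]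
      else warnings
    let warnings :=
      if 10 * long_lines > 1 * n then
        warnings ++ ["Alcune righe molto lunghe: " ++ PySem.Int.toStr long_lines ++ "/" ++ PySem.Int.toStr n]
      else warnings
    [("errors", errors), ("warnings", warnings)]

-- ===== PORT B =====
-- Hand-written binary searches, transliterating Source B's _bisect_left/_bisect_right while-loops as
-- lo/hi recursions.  a[mid] is read with getD 0: in every call made by the port lo ≤ mid < hi ≤ a.length,
-- so the index is in range exactly as in the Python (which would raise otherwise).
def pvBisectLeft (a : List Int) (x : Int) (lo hi : Nat) : Nat :=
  if _h : lo < hi then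
    let mid := (lo + hi) / 2
    if a.getD mid 0 < x then pvBisectLeft a x (mid + 1) hi
    else pvBisectLeft a x lo mid
  else lo
termination_by hi - lo
decreasing_by all_goals omega

def pvBisectRight (a : List Int) (x : Int) (lo hi : Nat) : Nat :=
  if _h : lo < hi then
    let mid := (lo + hi) / 2
    if x < a.getD mid 0 then pvBisectRight a x lo mid
    else pvBisectRight a x (mid + 1) hi
  else lo
termination_by hi - lo
decreasing_by all_goals omega

def validate_text_dataset_py_alt (dataset : List (List (String × String))) : List (String × List String) :=
  if dataset = [] then
    [("errors", ["Dataset vuoto"]), ("warnings", [])]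
  else
    let lengths : List Int :=
      PySem.List.sorted (dataset.map (fun entry =>
        PySem.Str.len (PySem.Dict.getD (PySem.Dict.mk entry) "text" ""))) (fun x => x) false
    let n : Int := dataset.length
    let short_lines : Int := pvBisectLeft lengths 10 0 lengths.length
    let long_lines : Int := n - pvBisectRight lengths 1000 0 lengths.length
    let warnings : List String :=
      (if 10 * short_lines > 3 * n then
        ["Molte righe troppo corte: " ++ PySem.Int.toStr short_lines ++ "/" ++ PySem.Int.toStr n]
       else []) ++
      (if 10 * long_lines > 1 * n then
        ["Alcune righe molto lunghe: " ++ PySem.Int.toStr long_lines ++ "/" ++ PySem.Int.toStr n]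
       else [])
    [("errors", []), ("warnings", warnings)]

-- ===== PRECONDITION & SPEC =====
def Spec_validate_text_dataset_py (dataset : List (List (String × String))) (out : List (String × List String)) : Prop := out = validate_text_dataset_py_alt dataset
instance (dataset : List (List (String × String))) (out : List (String × List String)) : Decidable (Spec_validate_text_dataset_py dataset out) := by unfold Spec_validate_text_dataset_py; infer_instance

-- ===== CLAIM =====
def Claim_equal_validate_text_dataset_py : Prop := ∀ (dataset : List (List (String × String))), Dom_validate_text_dataset_py dataset → Spec_validate_text_dataset_py dataset (validate_text_dataset_py dataset)

-- ===== LEMMAS AND PROOFS =====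

-- A counting foldl with an Int accumulator is countP.
theorem foldl_count_eq_countP {α : Type} (p : α → Prop) [DecidablePred p] (xs : List α) (a : Int) :
    xs.foldl (fun acc e => if p e then acc + 1 else acc) a
      = a + (xs.countP (fun e => decide (p e)) : Int) := by
  induction xs generalizing a with
  | nil => simp
  | cons x t ih =>
    by_cases h : p x
    · simp [h, ih]; ring
    · simp [h, ih]

-- A list split at r (prefix satisfies p, suffix does not) has countP p = r.
theorem countP_eq_of_split (p : Int → Bool) :
    ∀ (s : List Int) (r : Nat), r ≤ s.length →
      (∀ j (hj : j < s.length), j < r → p s[j] = true) →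
      (∀ j (hj : j < s.length), r ≤ j → p s[j] = false) →
      s.countP p = r := by
  intro s
  induction s with
  | nil => intro r hr _ _; simp only [List.countP_nil, List.length_nil] at hr ⊢; omega
  | cons x t ih =>
    intro r hr h1 h2
    cases r with
    | zero =>
      have hx : p x = false := h2 0 (by simp) (by omega)
      have ht : t.countP p = 0 := by
        apply ih 0 (by omega)
        · intro j hj hlt; omega
        · intro j hj _
          have := h2 (j + 1) (by simpa using Nat.succ_lt_succ hj) (by omega)
          simpa using this
      simp [hx, ht]
    | succ r' =>
      have hx : p x = true := h1 0 (by simp) (by omega)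
      have ht : t.countP p = r' := by
        apply ih r' (by simpa using hr)
        · intro j hj hlt
          have := h1 (j + 1) (by simpa using Nat.succ_lt_succ hj) (by omega)
          simpa using this
        · intro j hj hge
          have := h2 (j + 1) (by simpa using Nat.succ_lt_succ hj) (by omega)
          simpa using this
      simp [hx, ht]

-- The binary search pvBisectLeft, run on a sorted list with correct loop invariants,
-- returns the split point of the predicate (· < x).
theorem pvBisectLeft_split (a : List Int) (x : Int) (hs : a.Pairwise (· ≤ ·)) :
    ∀ (fuel lo hi : Nat), hi - lo ≤ fuel → lo ≤ hi → hi ≤ a.length →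
      (∀ j (hj : j < a.length), j < lo → a[j] < x) →
      (∀ j (hj : j < a.length), hi ≤ j → x ≤ a[j]) →
      pvBisectLeft a x lo hi ≤ a.length ∧
      (∀ j (hj : j < a.length), j < pvBisectLeft a x lo hi → a[j] < x) ∧
      (∀ j (hj : j < a.length), pvBisectLeft a x lo hi ≤ j → x ≤ a[j]) := by
  have hmono : ∀ i j (hi : i < a.length) (hj : j < a.length), i ≤ j → a[i] ≤ a[j] := by
    intro i j hi hj hij
    rcases Nat.eq_or_lt_of_le hij with rfl | hlt
    · exact le_refl _
    · exact (List.pairwise_iff_getElem.mp hs) i j hi hj hlt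
  intro fuel
  induction fuel with
  | zero =>
    intro lo hi hfuel hlh hhl h1 h2
    have : lo = hi := by omega
    subst this
    rw [pvBisectLeft]
    simp only [lt_irrefl, dif_neg, not_false_iff]
    exact ⟨by omega, fun j hj hlt => h1 j hj hlt, fun j hj hge => h2 j hj hge⟩
  | succ f ih =>
    intro lo hi hfuel hlh hhl h1 h2
    rw [pvBisectLeft]
    by_cases h : lo < hi
    · simp only [h, dif_pos]
      have hmid1 : lo ≤ (lo + hi) / 2 := by omega
      have hmid2 : (lo + hi) / 2 < hi := by omega
      have hmlen : (lo + hi) / 2 < a.length := by omega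
      have hget : a.getD ((lo + hi) / 2) 0 = a[(lo + hi) / 2] := List.getD_eq_getElem a 0 hmlen
      by_cases hc : a.getD ((lo + hi) / 2) 0 < x
      · simp only [hc, if_pos]
        apply ih ((lo + hi) / 2 + 1) hi (by omega) (by omega) hhl
        · intro j hj hlt
          calc a[j] ≤ a[(lo + hi) / 2] := hmono j _ hj hmlen (by omega)
            _ < x := by rw [← hget]; exact hc
        · exact h2
      · simp only [hc, if_neg, not_false_iff]
        apply ih lo ((lo + hi) / 2) (by omega) (by omega) (by omega) h1
        intro j hj hge
        calc x ≤ a[(lo + hi) / 2] := by rw [← hget]; omega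
          _ ≤ a[j] := hmono _ j hmlen hj hge
    · simp only [h, dif_neg, not_false_iff]
      have : lo = hi := by omega
      subst this
      exact ⟨by omega, fun j hj hlt => h1 j hj hlt, fun j hj hge => h2 j hj hge⟩

-- Same for pvBisectRight with the predicate (· ≤ x).
theorem pvBisectRight_split (a : List Int) (x : Int) (hs : a.Pairwise (· ≤ ·)) :
    ∀ (fuel lo hi : Nat), hi - lo ≤ fuel → lo ≤ hi → hi ≤ a.length →
      (∀ j (hj : j < a.length), j < lo → a[j] ≤ x) →
      (∀ j (hj : j < a.length), hi ≤ j → x < a[j]) →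
      pvBisectRight a x lo hi ≤ a.length ∧
      (∀ j (hj : j < a.length), j < pvBisectRight a x lo hi → a[j] ≤ x) ∧
      (∀ j (hj : j < a.length), pvBisectRight a x lo hi ≤ j → x < a[j]) := by
  have hmono : ∀ i j (hi : i < a.length) (hj : j < a.length), i ≤ j → a[i] ≤ a[j] := by
    intro i j hi hj hij
    rcases Nat.eq_or_lt_of_le hij with rfl | hlt
    · exact le_refl _
    · exact (List.pairwise_iff_getElem.mp hs) i j hi hj hlt
  intro fuel
  induction fuel with
  | zero =>
    intro lo hi hfuel hlh hhl h1 h2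
    have : lo = hi := by omega
    subst this
    rw [pvBisectRight]
    simp only [lt_irrefl, dif_neg, not_false_iff]
    exact ⟨by omega, fun j hj hlt => h1 j hj hlt, fun j hj hge => h2 j hj hge⟩
  | succ f ih =>
    intro lo hi hfuel hlh hhl h1 h2
    rw [pvBisectRight]
    by_cases h : lo < hi
    · simp only [h, dif_pos]
      have hmid1 : lo ≤ (lo + hi) / 2 := by omega
      have hmid2 : (lo + hi) / 2 < hi := by omega
      have hmlen : (lo + hi) / 2 < a.length := by omega
      have hget : a.getD ((lo + hi) / 2) 0 = a[(lo + hi) / 2] := List.getD_eq_getElem a 0 hmlen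
      by_cases hc : x < a.getD ((lo + hi) / 2) 0
      · simp only [hc, if_pos]
        apply ih lo ((lo + hi) / 2) (by omega) (by omega) (by omega) h1
        intro j hj hge
        calc x < a[(lo + hi) / 2] := by rw [← hget]; exact hc
          _ ≤ a[j] := hmono _ j hmlen hj hge
      · simp only [hc, if_neg, not_false_iff]
        apply ih ((lo + hi) / 2 + 1) hi (by omega) (by omega) hhl
        · intro j hj hlt
          calc a[j] ≤ a[(lo + hi) / 2] := hmono j _ hj hmlen (by omega)
            _ ≤ x := by rw [← hget]; omega
        · exact h2
    · simp only [h, dif_neg, not_false_iff]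
      have : lo = hi := by omega
      subst this
      exact ⟨by omega, fun j hj hlt => h1 j hj hlt, fun j hj hge => h2 j hj hge⟩

-- pvBisectLeft over the full sorted list counts the elements < x.
theorem bisectLeft_eq_countP (xs : List Int) (x : Int) :
    pvBisectLeft (PySem.List.sorted xs (fun y => y) false) x 0
        (PySem.List.sorted xs (fun y => y) false).length
      = xs.countP (fun y => y < x) := by
  set s := PySem.List.sorted xs (fun y => y) false with hs_def
  have hs : s.Pairwise (· ≤ ·) := by
    simpa using PySem.List.sorted_pairwise xs (fun y => y)
  obtain ⟨hle, h1, h2⟩ := pvBisectLeft_split s x hs s.length 0 s.length (by omega) (by omega)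
    (le_refl _) (by intro j hj hlt; omega) (by intro j hj hge; omega)
  have hcount : s.countP (fun y => y < x) = pvBisectLeft s x 0 s.length := by
    apply countP_eq_of_split
    · exact hle
    · intro j hj hlt; simpa using h1 j hj hlt
    · intro j hj hge; simpa using h2 j hj hge
  have hperm : s.Perm xs := PySem.List.sorted_perm xs (fun y => y) false
  rw [← hperm.countP_eq, hcount]

-- n - pvBisectRight over the full sorted list counts the elements > x.
theorem bisectRight_eq_countP (xs : List Int) (x : Int) :
    (xs.length : Int) - pvBisectRight (PySem.List.sorted xs (fun y => y) false) x 0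
        (PySem.List.sorted xs (fun y => y) false).length
      = (xs.countP (fun y => x < y) : Int) := by
  set s := PySem.List.sorted xs (fun y => y) false with hs_def
  have hs : s.Pairwise (· ≤ ·) := by
    simpa using PySem.List.sorted_pairwise xs (fun y => y)
  obtain ⟨hle, h1, h2⟩ := pvBisectRight_split s x hs s.length 0 s.length (by omega) (by omega)
    (le_refl _) (by intro j hj hlt; omega) (by intro j hj hge; omega)
  have hperm : s.Perm xs := PySem.List.sorted_perm xs (fun y => y) false
  have hlen : s.length = xs.length := hperm.length_eq
  have hcle : s.countP (fun y => y ≤ x) = pvBisectRight s x 0 s.length := by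
    apply countP_eq_of_split
    · exact hle
    · intro j hj hlt; simpa using h1 j hj hlt
    · intro j hj hge; simpa [not_le] using h2 j hj hge
  have hlen_eq := List.length_eq_countP_add_countP (l := s) (p := fun y => decide (x < y))
  simp only [decide_eq_true_eq, not_lt] at hlen_eq
  have hp := hperm.countP_eq (p := fun y => decide (x < y))
  omega

-- ===== VERDICT =====
theorem validate_text_dataset_py_spec : Claim_equal_validate_text_dataset_py := by
  intro dataset _
  unfold Spec_validate_text_dataset_py validate_text_dataset_py validate_text_dataset_py_alt
  by_cases h : dataset = []
  · simp [h]
  · simp only [h, if_false]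
    have hshort :
        dataset.foldl (fun acc entry =>
          if PySem.Str.len (PySem.Dict.getD (PySem.Dict.mk entry) "text" "") < 10 then acc + 1 else acc) (0 : Int)
        = ((dataset.map (fun entry => PySem.Str.len (PySem.Dict.getD (PySem.Dict.mk entry) "text" ""))).countP
            (fun y => decide (y < 10)) : Int) := by
      rw [foldl_count_eq_countP (fun entry =>
        PySem.Str.len (PySem.Dict.getD (PySem.Dict.mk entry) "text" "") < 10) dataset 0]
      simp [List.countP_map, Function.comp_def]
    have hlong :
        dataset.foldl (fun acc entry =>
          if PySem.Str.len (PySem.Dict.getD (PySem.Dict.mk entry) "text" "") > 1000 then acc + 1 else acc) (0 : Int)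
        = ((dataset.map (fun entry => PySem.Str.len (PySem.Dict.getD (PySem.Dict.mk entry) "text" ""))).countP
            (fun y => decide (1000 < y)) : Int) := by
      rw [foldl_count_eq_countP (fun entry =>
        PySem.Str.len (PySem.Dict.getD (PySem.Dict.mk entry) "text" "") > 1000) dataset 0]
      simp [List.countP_map, Function.comp_def]
    have hbl := bisectLeft_eq_countP
      (dataset.map (fun entry => PySem.Str.len (PySem.Dict.getD (PySem.Dict.mk entry) "text" ""))) 10
    have hbr := bisectRight_eq_countP
      (dataset.map (fun entry => PySem.Str.len (PySem.Dict.getD (PySem.Dict.mk entry) "text" ""))) 1000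
    simp only [List.length_map] at hbr
    rw [hshort, hlong, ← hbl, ← hbr]
    split_ifs <;> simp
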